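-- pv_equiv track=rewrite | github.com/Querolj/Handwritting-code | learning_manager.py | get_char_from_text
-- ===== SOURCE A (Python) =====
-- def get_char_from_text(text,i,j):
-- 	line = 0
-- 	char = 0
-- 	for l in text:
-- 		if j==char and i==line:
-- 			return l
-- 		char +=1
-- 		if l == " ":
-- 			line +=1
-- 			char = 0
--
-- 	return None
-- ===== SOURCE B (Python) =====
-- def get_char_from_text(text, i, j):
--     # 'lines' are the space-terminated segments of the text (each non-final
--     # segment keeps its trailing space, so a space is returnable at its column).
--     parts = text.split(' ')
--     lines = [p + ' ' for p in parts[:-1]] + parts[-1:]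
--     if 0 <= i < len(lines) and 0 <= j < len(lines[i]):
--         return lines[i][j]
--     return None
-- ===== Notes on version B (the rewrite author's own statement) =====
-- stated objective: simpler
-- what changed: Replaces the char-by-char scan with line/column counters by splitting the text on ' ' once (re-appending the separator to each non-final segment) and returning lines[i][j] under a direct bounds check.
import Mathlib
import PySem

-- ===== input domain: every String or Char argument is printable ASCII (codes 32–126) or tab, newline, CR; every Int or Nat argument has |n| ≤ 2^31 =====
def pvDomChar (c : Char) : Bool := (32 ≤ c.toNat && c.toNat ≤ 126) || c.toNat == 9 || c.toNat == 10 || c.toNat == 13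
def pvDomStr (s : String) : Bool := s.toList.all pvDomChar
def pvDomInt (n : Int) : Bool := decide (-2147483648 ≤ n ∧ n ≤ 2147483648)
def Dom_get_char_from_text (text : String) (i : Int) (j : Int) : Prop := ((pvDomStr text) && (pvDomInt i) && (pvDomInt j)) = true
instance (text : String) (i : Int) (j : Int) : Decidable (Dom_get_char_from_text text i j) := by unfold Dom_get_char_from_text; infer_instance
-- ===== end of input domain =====

-- B replaces A's char-by-char scan with counters by a split-then-index lookup; objective: simpler.

-- ===== PORT A =====
-- A's for-loop with early return, over the remaining characters with the (line, char) counters.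
def getCharLoopA (cs : List Char) (i j : Int) (line char : Int) : Option String :=
  match cs with
  | [] => none
  | l :: rest =>
      if j = char ∧ i = line then some (String.mk [l])
      else if l = ' ' then getCharLoopA rest i j (line + 1) 0
      else getCharLoopA rest i j line (char + 1)

def get_char_from_text (text : String) (i : Int) (j : Int) : Option String :=
  getCharLoopA text.toList i j 0 0

-- ===== PORT B =====
def get_char_from_text_alt (text : String) (i : Int) (j : Int) : Option String :=
  let parts := PySem.Chars.splitOn text.toList [' ']
  let lines := (PySem.List.slice parts none (some (-1))).map (fun p => p ++ [' '])
                 ++ PySem.List.slice parts (some (-1)) none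
  if 0 ≤ i ∧ i < (lines.length : Int) ∧ 0 ≤ j ∧ j < ((lines.getD i.toNat []).length : Int)
  then some (String.mk [(lines.getD i.toNat []).getD j.toNat ' '])
  else none

-- ===== PRECONDITION & SPEC =====
def Spec_get_char_from_text (text : String) (i : Int) (j : Int) (out : Option String) : Prop := out = get_char_from_text_alt text i j
instance (text : String) (i : Int) (j : Int) (out : Option String) : Decidable (Spec_get_char_from_text text i j out) := by unfold Spec_get_char_from_text; infer_instance

-- ===== CLAIM (what is proved, stated in full; the proofs are below) =====
def Claim_equal_get_char_from_text : Prop := ∀ (text : String) (i : Int) (j : Int), Dom_get_char_from_text text i j → Spec_get_char_from_text text i j (get_char_from_text text i j)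

-- ===== LEMMAS AND PROOFS =====

-- Python split(' '): accumulate the current piece directly (reference version for the proofs).
def mySplit (pre : List Char) : List Char → List (List Char)
  | [] => [pre]
  | c :: cs => if c = ' ' then pre :: mySplit [] cs else mySplit (pre ++ [c]) cs

-- The space-terminated segments of the text (each non-final one keeps its trailing space).
def splitSp : List Char → List (List Char)
  | [] => [[]]
  | c :: cs => if c = ' ' then [' '] :: splitSp cs
               else (c :: (splitSp cs).headI) :: (splitSp cs).tail

-- B's guarded double lookup.
def lkp (ls : List (List Char)) (i j : Int) : Option String :=
  if 0 ≤ i ∧ i < (ls.length : Int) ∧ 0 ≤ j ∧ j < ((ls.getD i.toNat []).length : Int)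
  then some (String.mk [(ls.getD i.toNat []).getD j.toNat ' '])
  else none

lemma splitOn_go_eq (l : List Char) : ∀ (fuel : Nat) (cur : List Char) (acc : List (List Char)),
    l.length < fuel →
    PySem.Chars.splitOn.go [' '] fuel l cur acc = acc.reverse ++ mySplit cur.reverse l := by
  induction l with
  | nil =>
      intro fuel cur acc h
      match fuel with
      | f + 1 => simp [PySem.Chars.splitOn.go, mySplit]
  | cons c rest ih =>
      intro fuel cur acc h
      match fuel with
      | f + 1 =>
        simp only [PySem.Chars.splitOn.go]
        by_cases hc : c = ' '
        · subst hc
          simp only [List.isPrefixOf, BEq.rfl, Bool.true_and, if_pos]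
          simp only [List.length_cons, List.length_nil, List.drop_succ_cons, List.drop_zero]
          rw [ih f [] (cur.reverse :: acc) (by simp at h ⊢; omega)]
          simp [mySplit]
        · have : ([' '].isPrefixOf (c :: rest)) = false := by
            simp [List.isPrefixOf]; exact fun hch => absurd hch.symm hc
          rw [this]
          simp only [Bool.false_eq_true, if_false]
          rw [ih f (c :: cur) acc (by simp at h ⊢; omega)]
          simp [mySplit, hc]

lemma splitOn_eq (l : List Char) : PySem.Chars.splitOn l [' '] = mySplit [] l := by
  unfold PySem.Chars.splitOn
  rw [splitOn_go_eq l (l.length + 1) [] [] (by omega)]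
  simp

lemma mySplit_ne_nil (pre : List Char) (cs : List Char) : mySplit pre cs ≠ [] := by
  induction cs generalizing pre with
  | nil => simp [mySplit]
  | cons c rest ih => by_cases hc : c = ' ' <;> simp [mySplit, hc, ih]

lemma mySplit_pre (cs : List Char) (pre : List Char) :
    mySplit pre cs = (pre ++ (mySplit [] cs).headI) :: (mySplit [] cs).tail := by
  induction cs generalizing pre with
  | nil => simp [mySplit]
  | cons c rest ih =>
      by_cases hc : c = ' '
      · simp [mySplit, hc]
      · simp only [mySplit, hc, if_false]
        rw [ih (pre ++ [c]), ih ([] ++ [c])]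
        simp

-- B's "rebuild lines from the split" equals splitSp.
def linesFn (ps : List (List Char)) : List (List Char) :=
  (PySem.List.slice ps none (some (-1))).map (fun p => p ++ [' ']) ++ PySem.List.slice ps (some (-1)) none

lemma linesFn_cons (h : List Char) (t : List (List Char)) (ht : t ≠ []) :
    linesFn (h :: t) = (h ++ [' ']) :: linesFn t := by
  obtain ⟨a, b, rfl⟩ := List.exists_cons_of_ne_nil ht
  unfold linesFn
  simp [PySem.List.slice, PySem.List.clampIdx]
  rw [if_neg (by omega : ¬ ((b.length : Int) + 1 < 0)), if_neg (by omega : ¬ ((b.length : Int) < 0))]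
  simp [List.take_succ_cons, List.drop_succ_cons]

lemma linesFn_singleton (h : List Char) : linesFn [h] = [h] := by
  simp [linesFn, PySem.List.slice, PySem.List.clampIdx]

lemma splitSp_eq_linesFn (cs : List Char) : linesFn (mySplit [] cs) = splitSp cs := by
  induction cs with
  | nil => simp [mySplit, splitSp, linesFn_singleton]
  | cons c rest ih =>
      by_cases hc : c = ' '
      · simp only [mySplit, splitSp, hc, if_true]
        rw [linesFn_cons [] (mySplit [] rest) (mySplit_ne_nil [] rest), ih]
        simp
      · simp only [mySplit, splitSp, if_neg hc]
        simp only [List.nil_append]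
        rw [mySplit_pre rest [c]]
        rcases he : mySplit [] rest with _ | ⟨h, t⟩
        · exact absurd he (mySplit_ne_nil [] rest)
        · rw [he] at ih
          simp only [List.headI_cons, List.tail_cons, List.singleton_append]
          cases t with
          | nil =>
            rw [linesFn_singleton] at ih
            rw [linesFn_singleton, ← ih]
            simp
          | cons a b =>
            have htn : (a :: b) ≠ [] := by simp
            rw [linesFn_cons (c :: h) (a :: b) htn]
            rw [linesFn_cons h (a :: b) htn] at ih
            rw [← ih]
            simp

lemma lkp_nil (i j : Int) : lkp [] i j = none := by
  unfold lkp
  rw [if_neg]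
  rintro ⟨h1, h2, -⟩
  simp at h2
  omega

lemma lkp_cons (h : List Char) (t : List (List Char)) (i j : Int) :
    lkp (h :: t) i j =
      if i = 0 then
        (if 0 ≤ j ∧ j < (h.length : Int) then some (String.mk [h.getD j.toNat ' ']) else none)
      else lkp t (i - 1) j := by
  unfold lkp
  by_cases hi : i = 0
  · subst hi
    rw [if_pos rfl]
    by_cases hj : 0 ≤ j ∧ j < (h.length : Int)
    · rw [if_pos, if_pos hj]
      · simp
      · exact ⟨le_refl 0, by simp, hj.1, by simpa using hj.2⟩
    · rw [if_neg, if_neg hj]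
      rintro ⟨-, -, hj1, hj2⟩
      simp at hj2
      exact hj ⟨hj1, hj2⟩
  · rw [if_neg hi]
    by_cases hpos : 0 < i
    · have hit : i.toNat = (i - 1).toNat + 1 := by omega
      by_cases hcond : 0 ≤ i - 1 ∧ i - 1 < (t.length : Int) ∧ 0 ≤ j ∧ j < ((t.getD (i-1).toNat []).length : Int)
      · rw [if_pos, if_pos hcond]
        · rw [hit]; simp
        · exact ⟨by omega, by simp; omega, hcond.2.2.1, by rw [hit]; simpa using hcond.2.2.2⟩
      · rw [if_neg, if_neg hcond]
        rintro ⟨h1, h2, h3, h4⟩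
        refine hcond ⟨by omega, by simp at h2; omega, h3, ?_⟩
        rw [hit] at h4
        simpa using h4
    · have hneg : i < 0 := by omega
      rw [if_neg (by rintro ⟨h1, -⟩; omega : ¬(0 ≤ i ∧ i < ((h :: t).length : Int) ∧ 0 ≤ j ∧ j < (((h :: t).getD i.toNat []).length : Int))),
          if_neg (by rintro ⟨h1, -⟩; omega : ¬(0 ≤ i - 1 ∧ i - 1 < (t.length : Int) ∧ 0 ≤ j ∧ j < ((t.getD (i-1).toNat []).length : Int)))]

lemma splitSp_ne_nil (cs : List Char) : splitSp cs ≠ [] := by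
  cases cs with
  | nil => simp [splitSp]
  | cons c rest => by_cases hc : c = ' ' <;> simp [splitSp, hc]
lemma splitSp_headI_len_pos (c : Char) (cs : List Char) :
    1 ≤ ((splitSp (c :: cs)).headI.length : Int) ∧
    (splitSp (c :: cs)).headI.getD 0 ' ' = c := by
  by_cases hc : c = ' '
  · subst hc; simp [splitSp]
  · simp [splitSp, hc]
lemma splitSp_space (cs : List Char) : splitSp (' ' :: cs) = [' '] :: splitSp cs := by
  simp [splitSp]
lemma splitSp_char (c : Char) (cs : List Char) (hc : c ≠ ' ') :
    splitSp (c :: cs) = (c :: (splitSp cs).headI) :: (splitSp cs).tail := by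
  simp [splitSp, hc]

lemma loopA_eq (cs : List Char) : ∀ (i j line char : Int), 0 ≤ char →
    getCharLoopA cs i j line char =
      if i = line then
        (if char ≤ j ∧ j - char < ((splitSp cs).headI.length : Int)
         then some (String.mk [(splitSp cs).headI.getD (j - char).toNat ' '])
         else none)
      else lkp (splitSp cs).tail (i - line - 1) j := by
  induction cs with
  | nil =>
      intro i j line char hchar
      simp only [getCharLoopA, splitSp, List.headI_cons, List.tail_cons]
      by_cases hi : i = line
      · rw [if_pos hi, if_neg (by rintro ⟨h1, h2⟩; simp at h2; omega)]
      · rw [if_neg hi, lkp_nil]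
  | cons c rest ih =>
      intro i j line char hchar
      simp only [getCharLoopA]
      by_cases hhit : j = char ∧ i = line
      · obtain ⟨hj, hi⟩ := hhit
        rw [if_pos ⟨hj, hi⟩, if_pos hi, if_pos ⟨by omega, by have := (splitSp_headI_len_pos c rest).1; omega⟩]
        have h0 : (j - char).toNat = 0 := by omega
        rw [h0, (splitSp_headI_len_pos c rest).2]
      · rw [if_neg hhit]
        by_cases hc : c = ' '
        · subst hc
          rw [if_pos rfl]
          rw [ih i j (line + 1) 0 (le_refl 0)]
          rw [splitSp_space rest]
          simp only [List.headI_cons, List.tail_cons]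
          by_cases hi : i = line
          · rw [if_neg (by omega : ¬ i = line + 1), if_pos hi]
            rw [if_neg]
            · have he : i - (line + 1) - 1 = i - line - 2 := by ring
              rw [he, hi]
              have h2 : line - line - 2 = (-2 : Int) := by ring
              rw [h2]
              unfold lkp
              rw [if_neg (by rintro ⟨h1, -⟩; omega)]
            · rintro ⟨h1, h2⟩
              simp at h2
              exact hhit ⟨by omega, hi⟩
          · rw [if_neg hi]
            by_cases hi2 : i = line + 1
            · rw [if_pos hi2]
              rcases hs : splitSp rest with _ | ⟨h, t⟩
              · exact absurd hs (splitSp_ne_nil rest)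
              · rw [lkp_cons h t]
                rw [if_pos (by omega : i - line - 1 = 0)]
                simp only [List.headI_cons]
                have he : j - 0 = j := by ring
                rw [he]
            · rw [if_neg hi2]
              rcases hs : splitSp rest with _ | ⟨h, t⟩
              · exact absurd hs (splitSp_ne_nil rest)
              · rw [lkp_cons h t]
                rw [if_neg (by omega : ¬ i - line - 1 = 0)]
                simp only [List.tail_cons]
                have he : i - line - 1 - 1 = i - (line + 1) - 1 := by ring
                rw [he]
        · rw [if_neg hc]
          rw [ih i j line (char + 1) (by omega)]
          rw [splitSp_char c rest hc]
          simp only [List.headI_cons, List.tail_cons]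
          by_cases hi : i = line
          · rw [if_pos hi, if_pos hi]
            by_cases hj : char + 1 ≤ j ∧ j - (char + 1) < (((splitSp rest).headI).length : Int)
            · rw [if_pos hj, if_pos]
              · have ht : (j - char).toNat = (j - (char + 1)).toNat + 1 := by omega
                rw [ht]
                simp
              · refine ⟨by omega, ?_⟩
                simp only [List.length_cons]
                push_cast
                omega
            · rw [if_neg hj, if_neg]
              rintro ⟨h1, h2⟩
              have hjne : ¬ j = char := fun hh => hhit ⟨hh, hi⟩
              refine hj ⟨by omega, ?_⟩
              simp only [List.length_cons] at h2
              push_cast at h2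
              omega
          · rw [if_neg hi, if_neg hi]

lemma alt_eq_lkp (text : String) (i j : Int) :
    get_char_from_text_alt text i j = lkp (splitSp text.toList) i j := by
  unfold get_char_from_text_alt lkp
  rw [splitOn_eq, ← splitSp_eq_linesFn text.toList]
  rfl

-- ===== VERDICT (by name: the statement is the Claim_ definition above) =====
theorem get_char_from_text_spec : Claim_equal_get_char_from_text := by
  intro text i j _
  unfold Spec_get_char_from_text
  rw [alt_eq_lkp]
  unfold get_char_from_text
  rw [loopA_eq text.toList i j 0 0 (le_refl 0)]
  rcases hs : splitSp text.toList with _ | ⟨h, t⟩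
  · exact absurd hs (splitSp_ne_nil text.toList)
  · rw [lkp_cons h t]
    simp only [List.headI_cons, List.tail_cons]
    by_cases hi : i = 0
    · rw [if_pos hi, if_pos hi]
      simp
    · rw [if_neg hi, if_neg hi]
      have he : i - 0 - 1 = i - 1 := by ring
      rw [he]
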